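-- pv_equiv track=rewrite | github.com/miaseemann/einsendeaufgaben | esa_7/rsa_decode.py | verschluesseln_text
-- ===== SOURCE A (Python) =====
-- e = 37
--
-- n = 3713
--
-- def verschluesseln_buchstabe(buchstabe):
--     ascii_wert = ord(buchstabe)  # ASCII-Wert holen
--     verschluesselt = pow(ascii_wert, e, n)  # RSA Formel: c = m^e mod n
--     return verschluesselt
--
-- def verschluesseln_text(text):
--     woerter = text.split(" ")  # Nachricht in Wörter aufteilen
--     verschluesselte_woerter = []
--
--     for wort in woerter:
--         zahlen_liste = []
--         for buchstabe in wort: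
--             zahl = verschluesseln_buchstabe(buchstabe)
--             zahlen_liste.append(str(zahl))
--         verschluesselte_woerter.append("-".join(zahlen_liste))
--
--     # Wörter wieder mit Leerzeichen verbinden
--     verschluesselt_text = " ".join(verschluesselte_woerter)
--     return verschluesselt_text
-- ===== SOURCE B (Python) =====
-- e = 37
--
-- n = 3713
--
-- def verschluesseln_text(text):
--     teile = []
--     am_wortanfang = True
--     for zeichen in text:
--         if zeichen == " ":
--             teile.append(" ")
--             am_wortanfang = True
--         else:
--             if not am_wortanfang:
--                 teile.append("-")
--             teile.append(str(pow(ord(zeichen), e, n)))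
--             am_wortanfang = False
--     return "".join(teile)
-- ===== Notes on version B (the rewrite author's own statement) =====
-- stated objective: simpler
-- what changed: Replaces the split-on-space/nested-loop/double-join structure with a single pass over the characters that keeps a word-start flag and emits separators inline.
import Mathlib
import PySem

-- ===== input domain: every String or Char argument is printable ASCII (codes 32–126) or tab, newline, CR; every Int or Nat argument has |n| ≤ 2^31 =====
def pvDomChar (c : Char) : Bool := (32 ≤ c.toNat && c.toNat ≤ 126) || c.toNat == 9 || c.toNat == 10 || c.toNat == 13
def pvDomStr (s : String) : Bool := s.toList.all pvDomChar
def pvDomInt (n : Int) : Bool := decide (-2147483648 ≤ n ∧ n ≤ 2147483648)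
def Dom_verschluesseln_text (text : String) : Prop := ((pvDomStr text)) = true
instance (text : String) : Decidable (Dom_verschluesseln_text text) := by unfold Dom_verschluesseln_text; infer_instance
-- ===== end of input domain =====

-- B replaces A's split(" ")/nested-loop/join structure by a single pass with a word-start flag (objective: simpler).

-- ===== PORT A =====
def verschluesseln_buchstabe (buchstabe : Char) : Int :=
  let ascii_wert : Int := (buchstabe.toNat : Int)
  PySem.Int.powMod ascii_wert 37 3713

def verschluesseln_text (text : String) : String :=
  let woerter := PySem.Chars.splitOn text.toList [' ']
  let verschluesselte_woerter :=
    woerter.foldl (fun vw wort =>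
      let zahlen_liste :=
        wort.foldl (fun zl buchstabe => zl ++ [PySem.Int.toChars (verschluesseln_buchstabe buchstabe)]) []
      vw ++ [PySem.Chars.join ['-'] zahlen_liste]) []
  String.ofList (PySem.Chars.join [' '] verschluesselte_woerter)

-- ===== PORT B =====
def vtAltStep (st : List (List Char) × Bool) (zeichen : Char) : List (List Char) × Bool :=
  if zeichen = ' ' then (st.1 ++ [[' ']], true)
  else (((if st.2 then st.1 else st.1 ++ [['-']]) ++
           [PySem.Int.toChars (PySem.Int.powMod ((zeichen.toNat : Int)) 37 3713)]), false)

def verschluesseln_text_alt (text : String) : String :=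
  String.ofList (PySem.Chars.join [] (text.toList.foldl vtAltStep ([], true)).1)

-- ===== PRECONDITION & SPEC =====
def Spec_verschluesseln_text (text : String) (out : String) : Prop := out = verschluesseln_text_alt text
instance (text : String) (out : String) : Decidable (Spec_verschluesseln_text text out) := by unfold Spec_verschluesseln_text; infer_instance

-- ===== CLAIM (what is proved, stated in full; the proofs are below) =====
def Claim_equal_verschluesseln_text : Prop := ∀ (text : String), Dom_verschluesseln_text text → Spec_verschluesseln_text text (verschluesseln_text text)

-- ===== LEMMAS AND PROOFS =====

-- proof-side split on ' ': (current word, remaining words)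
def vtSplit : List Char → List Char × List (List Char)
  | [] => ([], [])
  | c :: cs =>
      let p := vtSplit cs
      if c = ' ' then ([], p.1 :: p.2) else (c :: p.1, p.2)

def vtEnc (c : Char) : List Char := PySem.Int.toChars (PySem.Int.powMod ((c.toNat : Int)) 37 3713)

def vtWordEnc (w : List Char) : List Char := PySem.Chars.join ['-'] (w.map vtEnc)

def vtDashEnc (w : List Char) : List Char := (w.map (fun c => '-' :: vtEnc c)).flatten

def vtTail (ws : List (List Char)) : List Char := (ws.map (fun w => ' ' :: vtWordEnc w)).flatten

theorem vt_intercalate_flatten (ls : List (List Char)) :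
    List.intercalate ([] : List Char) ls = ls.flatten := by
  induction ls with
  | nil => simp [List.intercalate]
  | cons h t ih =>
    cases t with
    | nil => simp [List.intercalate]
    | cons h2 t2 =>
      simp only [List.intercalate, List.intersperse] at *
      simp_all

theorem vt_intercalate_cons (sep : List Char) (x : List Char) (xs : List (List Char)) :
    List.intercalate sep (x :: xs) = x ++ (xs.map (fun w => sep ++ w)).flatten := by
  induction xs generalizing x with
  | nil => simp [List.intercalate]
  | cons y ys ih =>
    have h := ih y
    simp only [List.intercalate, List.intersperse] at *
    cases ys with
    | nil => simp
    | cons z zs => simp_all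

theorem vt_go_spec (l : List Char) : ∀ (fuel : Nat) (cur : List Char) (acc : List (List Char)),
    l.length < fuel →
    PySem.Chars.splitOn.go [' '] fuel l cur acc
      = acc.reverse ++ (cur.reverse ++ (vtSplit l).1) :: (vtSplit l).2 := by
  induction l with
  | nil =>
    intro fuel cur acc h
    match fuel, h with
    | fuel + 1, _ => simp [PySem.Chars.splitOn.go, vtSplit]
  | cons c rest ih =>
    intro fuel cur acc h
    match fuel, h with
    | fuel + 1, h =>
      by_cases hc : c = ' '
      · subst hc
        have hstep : PySem.Chars.splitOn.go [' '] (fuel+1) (' '::rest) cur acc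
            = PySem.Chars.splitOn.go [' '] fuel rest [] (cur.reverse :: acc) := by
          simp [PySem.Chars.splitOn.go, List.isPrefixOf]
        rw [hstep, ih fuel [] (cur.reverse :: acc) (by simpa using Nat.lt_of_succ_lt_succ h)]
        simp [vtSplit]
      · have hstep : PySem.Chars.splitOn.go [' '] (fuel+1) (c::rest) cur acc
            = PySem.Chars.splitOn.go [' '] fuel rest (c :: cur) acc := by
          simp [PySem.Chars.splitOn.go, List.isPrefixOf, Ne.symm hc]
        rw [hstep, ih fuel (c :: cur) acc (by simpa using Nat.lt_of_succ_lt_succ h)]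
        simp [vtSplit, hc]

theorem vt_splitOn_eq (l : List Char) :
    PySem.Chars.splitOn l [' '] = (vtSplit l).1 :: (vtSplit l).2 := by
  have h := vt_go_spec l (l.length + 1) [] [] (by omega)
  simpa [PySem.Chars.splitOn] using h

theorem vtAltStep_space (st : List (List Char) × Bool) : vtAltStep st ' ' = (st.1 ++ [[' ']], true) := by
  simp [vtAltStep]

theorem vtAltStep_char {c : Char} (hc : c ≠ ' ') (st : List (List Char) × Bool) :
    vtAltStep st c = ((if st.2 then st.1 else st.1 ++ [['-']]) ++ [vtEnc c], false) := by
  simp [vtAltStep, vtEnc, hc]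

theorem vt_foldl_acc (cs : List Char) : ∀ (acc : List (List Char)) (flag : Bool),
    (cs.foldl vtAltStep (acc, flag)).1 = acc ++ (cs.foldl vtAltStep ([], flag)).1 := by
  induction cs with
  | nil => intro acc flag; simp
  | cons c rest ih =>
    intro acc flag
    by_cases hc : c = ' '
    · subst hc
      rw [List.foldl_cons, List.foldl_cons, vtAltStep_space, vtAltStep_space]
      rw [ih (acc ++ [[' ']]) true, ih ([] ++ [[' ']]) true]
      simp
    · rw [List.foldl_cons, List.foldl_cons, vtAltStep_char hc, vtAltStep_char hc]
      cases flag with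
      | true =>
        simp only [if_true]
        rw [ih (acc ++ [vtEnc c]) false, ih ([] ++ [vtEnc c]) false]
        simp
      | false =>
        simp only [Bool.false_eq_true, if_false]
        rw [ih (acc ++ [['-']] ++ [vtEnc c]) false, ih ([] ++ [['-']] ++ [vtEnc c]) false]
        simp

theorem vt_wordEnc_cons (c : Char) (w : List Char) :
    vtWordEnc (c :: w) = vtEnc c ++ vtDashEnc w := by
  simp only [vtWordEnc, vtDashEnc, List.map_cons, PySem.Chars.join]
  rw [vt_intercalate_cons]
  simp only [List.map_map]
  rfl

theorem vt_main (cs : List Char) :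
    ((cs.foldl vtAltStep ([], true)).1.flatten
        = vtWordEnc (vtSplit cs).1 ++ vtTail (vtSplit cs).2)
    ∧ ((cs.foldl vtAltStep ([], false)).1.flatten
        = vtDashEnc (vtSplit cs).1 ++ vtTail (vtSplit cs).2) := by
  induction cs with
  | nil => simp [vtSplit, vtWordEnc, vtDashEnc, vtTail, PySem.Chars.join, List.intercalate]
  | cons c rest ih =>
    obtain ⟨ihT, ihF⟩ := ih
    by_cases hc : c = ' '
    · subst hc
      constructor <;>
      · rw [List.foldl_cons, vtAltStep_space]
        simp only []
        rw [vt_foldl_acc rest ([] ++ [[' ']]) true]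
        simp only [List.flatten_append, List.flatten_cons, List.flatten_nil]
        rw [ihT]
        simp [vtSplit, vtTail, vtWordEnc, vtDashEnc, PySem.Chars.join, List.intercalate]
    · constructor
      · rw [List.foldl_cons, vtAltStep_char hc]
        simp only [if_true, List.nil_append]
        rw [vt_foldl_acc rest [vtEnc c] false]
        simp only [List.flatten_append, List.flatten_cons, List.flatten_nil]
        rw [ihF]
        simp [vtSplit, hc, vt_wordEnc_cons]
      · rw [List.foldl_cons, vtAltStep_char hc]
        simp only [Bool.false_eq_true, if_false]
        rw [show ([] : List (List Char)) ++ [['-']] = [['-']] from rfl]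
        rw [vt_foldl_acc rest ([['-']] ++ [vtEnc c]) false]
        simp only [List.flatten_append, List.flatten_cons, List.flatten_nil]
        rw [ihF]
        simp [vtSplit, hc, vtDashEnc]

-- ===== VERDICT (by name: the statement is the Claim_ definition above) =====
theorem verschluesseln_text_spec : Claim_equal_verschluesseln_text := by
  intro text _
  show _ = _
  unfold verschluesseln_text verschluesseln_text_alt
  rw [vt_splitOn_eq]
  simp only [PySem.List.foldl_append_singleton_eq_map]
  have hmain := (vt_main text.toList).1
  simp only [PySem.Chars.join] at hmain ⊢
  rw [show ∀ l : List (List Char), ([] : List Char).intercalate l = l.flatten from vt_intercalate_flatten]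
  rw [hmain]
  simp only [List.nil_append, List.map_cons]
  rw [vt_intercalate_cons]
  congr 1
  congr 1
  · simp only [vtTail, List.map_map]
    rfl
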